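-- pv_equiv track=rewrite | github.com/irfanrealco/manus-skills | skills/tier1-foundation/api-endpoint-builder/scripts/generate_endpoints.py | parse_code_files
-- ===== SOURCE A (Python) =====
-- def parse_code_files(code_output):
--     """Parse code output into separate files."""
--     files = {}
--     current_file = None
--     current_content = []
--
--     for line in code_output.split('\n'):
--         # Check for file path comments
--         if line.strip().startswith('// ') and ('/' in line or '.ts' in line or '.js' in line):
--             # Save previous file
--             if current_file:
--                 files[current_file] = '\n'.join(current_content)
--
--             # Start new file
--             current_file = line.strip().replace('// ', '').strip()
--             current_content = []
--         else:
--             if current_file: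
--                 current_content.append(line)
--
--     # Save last file
--     if current_file:
--         files[current_file] = '\n'.join(current_content)
--
--     # If no files detected, treat as single file
--     if not files:
--         files['api.ts'] = code_output
--
--     return files
-- ===== SOURCE B (Python) =====
-- def _is_marker(line):
--     return line.strip().startswith('// ') and ('/' in line or '.ts' in line or '.js' in line)
--
--
-- def _name(line):
--     return line.strip().replace('// ', '').strip()
--
--
-- def _collect(lines):
--     """Segment-scan: for each marker line, slice out the block up to the next marker."""
--     segs = []
--     pos = 0
--     n = len(lines)
--     while pos < n:
--         if _is_marker(lines[pos]):
--             end = pos + 1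
--             while end < n and not _is_marker(lines[end]):
--                 end += 1
--             segs.append((_name(lines[pos]), '\n'.join(lines[pos + 1:end])))
--             pos = end
--         else:
--             pos += 1
--     return segs
--
--
-- def parse_code_files(code_output):
--     """Parse code output into separate files."""
--     segs = _collect(code_output.split('\n'))
--     if not segs:
--         return {'api.ts': code_output}
--     files = {}
--     for name, content in segs:
--         files[name] = content
--     return files
-- ===== Notes on version B (the rewrite author's own statement) =====
-- stated objective: alternative
-- what changed: A's single pass with mutable current_file/current_content accumulator state is replaced by a two-index segment scan that locates each marker line and slices its content block out of the line list directly, then builds the dict from the (name, content) segments.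
import Mathlib
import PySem

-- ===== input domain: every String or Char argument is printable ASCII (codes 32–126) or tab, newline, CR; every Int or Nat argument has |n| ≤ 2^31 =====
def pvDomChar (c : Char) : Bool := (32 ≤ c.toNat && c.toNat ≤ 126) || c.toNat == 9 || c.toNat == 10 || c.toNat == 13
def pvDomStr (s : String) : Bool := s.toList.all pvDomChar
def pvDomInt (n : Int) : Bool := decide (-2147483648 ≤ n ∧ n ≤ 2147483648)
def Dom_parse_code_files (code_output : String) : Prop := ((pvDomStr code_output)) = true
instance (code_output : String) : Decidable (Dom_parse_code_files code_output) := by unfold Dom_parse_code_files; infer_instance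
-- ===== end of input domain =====

-- B replaces A's running-accumulator loop (mutable current_file / current_content) by a
-- two-index segment scan that slices each marker's block out of the line list directly;
-- objective: alternative decomposition, same cost.

-- ===== PORT A =====
-- shared subexpressions of both Pythons: the marker test and the file-name extraction
def isMarker (line : String) : Bool :=
  PySem.Str.startswith (PySem.Str.strip line) "// " &&
    (PySem.Str.isIn "/" line || PySem.Str.isIn ".ts" line || PySem.Str.isIn ".js" line)

def markName (line : String) : String :=
  PySem.Str.strip (PySem.Str.replace (PySem.Str.strip line) "// " "")

-- code_output.split('\n')  (separator non-empty, so Chars.splitOn is exact)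
def splitLines (code_output : String) : List String :=
  (PySem.Chars.splitOn code_output.toList ['\n']).map String.ofList

-- 'if current_file: files[current_file] = "\n".join(current_content)'
def saveA (files : PySem.Dict String String) (cf : Option String) (cc : List String) :
    PySem.Dict String String :=
  match cf with
  | some f => if f ≠ "" then files.insert f (PySem.Str.join "\n" cc) else files
  | none => files

-- the body of A's for-loop
def stepA (st : PySem.Dict String String × Option String × List String) (line : String) :
    PySem.Dict String String × Option String × List String :=
  match st with
  | (files, cf, cc) =>
    if isMarker line then
      (saveA files cf cc, some (markName line), [])
    else
      match cf with
      | some f => if f ≠ "" then (files, some f, cc ++ [line]) else (files, some f, cc)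
      | none => (files, none, cc)

def parse_code_files (code_output : String) : List (String × String) :=
  match (splitLines code_output).foldl stepA (PySem.Dict.mk [], none, []) with
  | (files, cf, cc) =>
    let files := saveA files cf cc
    let files := if files.size = 0 then files.insert "api.ts" code_output else files
    files.items

-- ===== PORT B =====
-- inner while: advance end past non-marker lines (index always in range, so getD is exact)
def findEnd (lines : List String) (e : Nat) : Nat :=
  if e < lines.length then
    if isMarker (lines.getD e "") then e else findEnd lines (e + 1)
  else e
termination_by lines.length - e

theorem le_findEnd (lines : List String) (e : Nat) : e ≤ findEnd lines e := by
  unfold findEnd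
  split
  · split
    · exact le_refl e
    · exact le_trans (Nat.le_succ e) (le_findEnd lines (e + 1))
  · exact le_refl e
termination_by lines.length - e

-- outer while of _collect
def collectGo (lines : List String) (pos : Nat) : List (String × String) :=
  if h : pos < lines.length then
    if isMarker (lines.getD pos "") then
      let e := findEnd lines (pos + 1)
      (markName (lines.getD pos ""),
        PySem.Str.join "\n" (PySem.List.slice lines (some ((pos : Int) + 1)) (some (e : Int)))) ::
        collectGo lines e
    else collectGo lines (pos + 1)
  else []
termination_by lines.length - pos
decreasing_by
  · have := le_findEnd lines (pos + 1); omega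
  · omega

def parse_code_files_alt (code_output : String) : List (String × String) :=
  let segs := collectGo (splitLines code_output) 0
  if segs.isEmpty then
    (PySem.Dict.mk [("api.ts", code_output)]).items
  else
    (segs.foldl (fun d p => d.insert p.1 p.2) (PySem.Dict.mk ([] : List (String × String)))).items

-- ===== PRECONDITION & SPEC =====
def Spec_parse_code_files (code_output : String) (out : List (String × String)) : Prop := out = parse_code_files_alt code_output
instance (code_output : String) (out : List (String × String)) : Decidable (Spec_parse_code_files code_output out) := by unfold Spec_parse_code_files; infer_instance

-- ===== CLAIM (what is proved, stated in full; the proofs are below) =====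
def Claim_equal_parse_code_files : Prop := ∀ (code_output : String), Dom_parse_code_files code_output → Spec_parse_code_files code_output (parse_code_files code_output)

-- ===== LEMMAS AND PROOFS =====

-- clean segment spec both ports are reduced to
def collect : List String → List (String × String)
  | [] => []
  | l :: ls =>
    if isMarker l then
      (markName l, PySem.Str.join "\n" (ls.takeWhile (fun x => !isMarker x))) ::
        collect (ls.dropWhile (fun x => !isMarker x))
    else collect ls
termination_by ls => ls.length
decreasing_by
  · have := List.length_dropWhile_le (fun x => !isMarker x) ls
    simp only [List.length_cons]; omega
  · simp only [List.length_cons]; omega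

def saveSt (st : PySem.Dict String String × Option String × List String) :
    PySem.Dict String String :=
  saveA st.1 st.2.1 st.2.2


theorem go_nil (old new : List Char) (fuel : Nat) (acc : List Char) :
    PySem.Chars.replace.go old new fuel [] acc = acc.reverse := by
  cases fuel <;> simp [PySem.Chars.replace.go.eq_def]

theorem go_ends (fuel : Nat) (u : List Char) (c : Char) (acc : List Char)
    (hc : PySem.Chars.isspace c = false) :
    ∃ r, PySem.Chars.replace.go ['/', '/', ' '] [] fuel (u ++ [c]) acc =
      acc.reverse ++ r ++ [c] := by
  induction fuel generalizing u acc with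
  | zero => exact ⟨u, by simp [PySem.Chars.replace.go.eq_def]⟩
  | succ fuel ih =>
    match u with
    | [] =>
      rw [PySem.Chars.replace.go.eq_def]
      simp only [List.nil_append]
      rw [if_neg (by simp [List.isPrefixOf])]
      exact ⟨[], by rw [go_nil]; simp⟩
    | a :: u' =>
      rw [PySem.Chars.replace.go.eq_def]
      simp only [List.cons_append]
      by_cases hp : (['/', '/', ' '] : List Char).isPrefixOf (a :: (u' ++ [c])) = true
      · rw [if_pos hp]
        -- the dropped list still ends with c
        obtain ⟨t, ht⟩ := List.isPrefixOf_iff_prefix.mp hp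
        rcases List.eq_nil_or_concat t with rfl | ⟨t₀, tc, rfl⟩
        · exfalso
          have : c = ' ' := by
            have h1 : (a :: (u' ++ [c])).getLast? = some c := by
              show ((a :: u') ++ [c]).getLast? = some c
              exact List.getLast?_concat
            rw [← ht] at h1
            simpa using h1.symm
          rw [this] at hc
          simp [PySem.Chars.isspace] at hc
        · have hu : a :: (u' ++ [c]) = (['/', '/', ' '] ++ t₀) ++ [tc] := by
            rw [← ht]; simp
          have hctc : c = tc ∧ a :: u' = ['/', '/', ' '] ++ t₀ := by
            have h2 : (a :: u') ++ [c] = (['/', '/', ' '] ++ t₀) ++ [tc] := by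
              simpa using hu
            have := List.append_inj' h2 (by simp)
            exact ⟨by simpa using this.2, this.1⟩
          have hdrop : List.drop 3 (a :: (u' ++ [c])) = t₀ ++ [c] := by
            rw [hu, ← hctc.1]
            have : (['/', '/', ' '] ++ t₀) ++ [c] = ['/', '/', ' '] ++ (t₀ ++ [c]) := by simp
            rw [this]
            exact List.drop_left (l₁ := ['/', '/', ' '])
          obtain ⟨r, hr⟩ := ih t₀ acc
          refine ⟨r, ?_⟩
          simp only [List.length_cons, List.length_nil, List.nil_append, List.reverse_nil]
          simp only [show (0 + 1 + 1 + 1 : Nat) = 3 from rfl]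
          rw [hdrop]
          simpa using hr
      · rw [if_neg hp]
        obtain ⟨r, hr⟩ := ih u' (a :: acc)
        exact ⟨a :: r, by rw [hr]; simp⟩

-- x ending in a non-space char has non-empty strip
theorem strip_concat_ne (u : List Char) (c : Char) (hc : PySem.Chars.isspace c = false) :
    PySem.Chars.strip (u ++ [c]) ≠ [] := by
  unfold PySem.Chars.strip PySem.Chars.lstrip PySem.Chars.rstrip
  rw [List.dropWhile_append]
  split
  · simp [hc]
  · intro h
    simp only [List.reverse_eq_nil_iff] at h
    rw [List.reverse_append] at h
    simp only [List.reverse_cons, List.reverse_nil, List.nil_append] at h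
    rw [List.singleton_append, List.dropWhile_cons, hc] at h
    simp at h

-- rstrip output is [] or ends with a non-space char
theorem rstrip_shape (x : List Char) :
    PySem.Chars.rstrip x = [] ∨
      ∃ u c, PySem.Chars.rstrip x = u ++ [c] ∧ PySem.Chars.isspace c = false := by
  unfold PySem.Chars.rstrip
  rcases h : List.dropWhile PySem.Chars.isspace x.reverse with _ | ⟨c, w⟩
  · left; simp
  · right
    refine ⟨w.reverse, c, by simp, ?_⟩
    have := List.head?_dropWhile_not (p := PySem.Chars.isspace) (l := x.reverse)
    rw [h] at this
    simpa using this

theorem markName_chars_ne (s : List Char)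
    (hpre : PySem.Chars.startswith (PySem.Chars.strip s) ['/', '/', ' '] = true) :
    PySem.Chars.strip (PySem.Chars.replace (PySem.Chars.strip s) ['/', '/', ' '] []) ≠ [] := by
  have hshape := rstrip_shape (PySem.Chars.lstrip s)
  have hstrip : PySem.Chars.strip s = PySem.Chars.rstrip (PySem.Chars.lstrip s) := rfl
  rcases hshape with h0 | ⟨u, c, hu, hc⟩
  · rw [hstrip, h0] at hpre
    simp [PySem.Chars.startswith, List.isPrefixOf] at hpre
  · rw [hstrip, hu]
    unfold PySem.Chars.replace
    rw [if_neg (by simp)]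
    obtain ⟨r, hr⟩ := go_ends ((u ++ [c]).length) u c [] hc
    rw [hr]
    simp only [List.reverse_nil, List.nil_append]
    exact strip_concat_ne r c hc


theorem markName_ne (l : String) (h : isMarker l = true) : markName l ≠ "" := by
  have hsw : PySem.Chars.startswith (PySem.Chars.strip l.toList) ['/', '/', ' '] = true := by
    unfold isMarker at h
    have h1 := (Bool.and_eq_true _ _).mp h |>.1
    simpa [PySem.Str.startswith] using h1
  intro he
  apply markName_chars_ne l.toList hsw
  have := congrArg String.toList he
  simpa [markName, PySem.Str.strip, PySem.Str.replace] using this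

theorem foldA_some (ls : List String) :
    ∀ (d : PySem.Dict String String) (cc : List String) (n : String), n ≠ "" →
    saveSt (ls.foldl stepA (d, some n, cc)) =
      List.foldl (fun d (p : String × String) => d.insert p.1 p.2)
        (d.insert n (PySem.Str.join "\n" (cc ++ ls.takeWhile (fun x => !isMarker x))))
        (collect (ls.dropWhile (fun x => !isMarker x))) := by
  induction ls with
  | nil =>
    intro d cc n hn
    simp [saveSt, saveA, collect, hn]
  | cons l ls ih =>
    intro d cc n hn
    by_cases hm : isMarker l = true
    · have hstep : stepA (d, some n, cc) l = (d.insert n (PySem.Str.join "\n" cc), some (markName l), []) := by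
        simp [stepA, saveA, hm, hn]
      simp only [List.foldl_cons, hstep]
      rw [ih (d.insert n (PySem.Str.join "\n" cc)) [] (markName l) (markName_ne l hm)]
      simp [collect, hm]
    · have hstep : stepA (d, some n, cc) l = (d, some n, cc ++ [l]) := by
        simp [stepA, hm, hn]
      simp only [List.foldl_cons, hstep]
      rw [ih d (cc ++ [l]) n hn]
      simp [hm]

theorem foldA_none (ls : List String) :
    ∀ (d : PySem.Dict String String) (cc : List String),
    saveSt (ls.foldl stepA (d, none, cc)) =
      List.foldl (fun d (p : String × String) => d.insert p.1 p.2) d (collect ls) := by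
  induction ls with
  | nil => intro d cc; simp [saveSt, saveA, collect]
  | cons l ls ih =>
    intro d cc
    by_cases hm : isMarker l = true
    · have hstep : stepA (d, none, cc) l = (d, some (markName l), []) := by
        simp [stepA, saveA, hm]
      simp only [List.foldl_cons, hstep]
      rw [foldA_some ls d [] (markName l) (markName_ne l hm)]
      simp [collect, hm]
    · have hstep : stepA (d, none, cc) l = (d, none, cc) := by
        simp [stepA, hm]
      simp only [List.foldl_cons, hstep]
      rw [ih d cc]
      simp [collect, hm]

theorem findEnd_eq (lines : List String) (j : Nat) :
    findEnd lines j = j + ((lines.drop j).takeWhile (fun x => !isMarker x)).length := by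
  fun_induction findEnd with
  | case1 e h hm =>
    rw [List.drop_eq_getElem_cons h]
    rw [List.getD_eq_getElem lines "" h] at hm
    simp [hm]
  | case2 e h hm ih =>
    rw [ih]
    conv_rhs => rw [List.drop_eq_getElem_cons h]
    rw [List.getD_eq_getElem lines "" h] at hm
    simp only [List.takeWhile_cons]
    rw [show (!isMarker lines[e]) = true by simp [hm]]
    simp
    omega
  | case3 e h =>
    rw [List.drop_eq_nil_of_le (by omega)]
    simp

theorem take_takeWhile {α : Type} (p : α → Bool) (u : List α) :
    u.take (u.takeWhile p).length = u.takeWhile p := by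
  induction u with
  | nil => rfl
  | cons a u ih =>
    by_cases hp : p a = true
    · simp [hp, ih]
    · simp [hp]

theorem drop_takeWhile {α : Type} (p : α → Bool) (u : List α) :
    u.drop (u.takeWhile p).length = u.dropWhile p := by
  induction u with
  | nil => rfl
  | cons a u ih =>
    by_cases hp : p a = true
    · simp [hp, ih]
    · simp [hp]

theorem collectGo_eq (lines : List String) (pos : Nat) :
    collectGo lines pos = collect (lines.drop pos) := by
  fun_induction collectGo with
  | case1 pos h hm e ih =>
    rw [List.drop_eq_getElem_cons h]
    rw [List.getD_eq_getElem lines "" h] at hm ⊢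
    rw [collect]
    rw [if_pos hm]
    have he : e = (pos + 1) + ((lines.drop (pos + 1)).takeWhile (fun x => !isMarker x)).length :=
      findEnd_eq lines (pos + 1)
    have hlen : ((lines.drop (pos + 1)).takeWhile (fun x => !isMarker x)).length ≤ lines.length - (pos + 1) := by
      have h1 := (List.takeWhile_prefix (l := lines.drop (pos + 1)) (fun x => !isMarker x)).length_le
      rw [List.length_drop] at h1; omega
    have hslice : PySem.List.slice lines (some ((pos : Int) + 1)) (some (e : Int)) =
        (lines.drop (pos + 1)).takeWhile (fun x => !isMarker x) := by
      have hcast : ((pos : Int) + 1) = ((pos + 1 : Nat) : Int) := by push_cast; ring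
      rw [hcast, PySem.List.slice_natCast]
      rw [show e - (pos + 1) = ((lines.drop (pos + 1)).takeWhile (fun x => !isMarker x)).length by omega]
      exact take_takeWhile _ _
    have hdrop : lines.drop e = (lines.drop (pos + 1)).dropWhile (fun x => !isMarker x) := by
      rw [he, ← List.drop_drop]
      exact drop_takeWhile _ _
    rw [hslice, ih, hdrop]
  | case2 pos h hm ih =>
    rw [List.drop_eq_getElem_cons h]
    rw [List.getD_eq_getElem lines "" h] at hm
    rw [collect, if_neg hm]
    exact ih
  | case3 pos h =>
    rw [List.drop_eq_nil_of_le (by omega), collect]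

theorem size_le_foldl (l : List (String × String)) :
    ∀ d : PySem.Dict String String,
      d.size ≤ (l.foldl (fun d p => d.insert p.1 p.2) d).size := by
  induction l with
  | nil => intro d; simp
  | cons p rest ih =>
    intro d
    refine le_trans ?_ (ih (d.insert p.1 p.2))
    unfold PySem.Dict.insert PySem.Dict.size
    split <;> simp

theorem ports_agree (code_output : String) :
    parse_code_files code_output = parse_code_files_alt code_output := by
  unfold parse_code_files parse_code_files_alt
  rw [collectGo_eq, List.drop_zero]
  have h := foldA_none (splitLines code_output) (PySem.Dict.mk []) []
  rcases hst : (splitLines code_output).foldl stepA (PySem.Dict.mk [], none, []) with ⟨d2, cf2, cc2⟩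
  rw [hst] at h
  simp only [saveSt] at h
  dsimp only
  rcases hcol : collect (splitLines code_output) with _ | ⟨p, rest⟩
  · rw [hcol] at h
    simp only [List.foldl_nil] at h
    simp [h, PySem.Dict.size, PySem.Dict.insert, PySem.Dict.contains]
  · rw [hcol] at h
    have hpos : 0 < (List.foldl (fun d (p : String × String) => d.insert p.1 p.2)
        (PySem.Dict.mk []) (p :: rest)).size := by
      simp only [List.foldl_cons]
      refine lt_of_lt_of_le ?_ (size_le_foldl rest _)
      simp [PySem.Dict.insert, PySem.Dict.contains, PySem.Dict.size]
    rw [h]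
    rw [if_neg (by omega)]
    simp

-- ===== VERDICT (by name: the statement is the Claim_ definition above) =====
theorem parse_code_files_spec : Claim_equal_parse_code_files := by
  intro code_output _
  unfold Spec_parse_code_files
  exact ports_agree code_output
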